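-- pv_equiv track=rewrite | github.com/Spantick/Aerotest-FFVL | python/utils/geometry3d.py | panels
-- ===== SOURCE A (Python) =====
-- def panels(shape, closed=False):
--     """
--     un generateur qui parcourt les panels d'un tableau de points de shape 'shape' dans le sens direct
--     un generateur renvoit les éléments les uns après les autres SANS créer explicitement la liste des éléments
--     => economie memoire
--     'shape' represente une famille de nervures consécutives.
--     Tous les tableaux 'points((nbn, nbpn,3))' de Axile ont cette shape.
--     Le tableau peut representer des nervures fermées (closed=True) en BF (points[k,0] == points[k,-1])
--     ou bien ouvertes (closed=False)  (points[k,0] != points[k,-1])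
--     :param shape : tuple = (nbn, nbpn,3)
--     :param closed : bool True si le BF est en double, False sinon
--     :return : les panels de 'points' sous la forme de 4 numeros de points A,B,C,D
--     --------
--     Utilisation :
--     -----------
--     >>> shape = (10,20,3)
--     >>> for panel in panels(nervures, False) :
--     >>>     print panel
--     """
--     nbn = shape[0]#nb nervures
--     nbpn = shape[1]#nb points par nervure
--     kcais = 0
--     while kcais < nbn-1:
--         N1 = list(range(kcais*nbpn, (kcais+1)*nbpn))#Des numeros de points
--         N2 = list(range((kcais+1)*nbpn, (kcais+2)*nbpn))
--         kpan = 0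
-- #         debug(caisson=kcais, kpan=kpan)
--         while kpan < nbpn-1 :
--             yield (N1[kpan], N2[kpan], N2[kpan+1], N1[kpan+1])
--             kpan += 1
--
--         if not closed :#Cas particulier : le dernier panel du caisson kcais
--             yield (N1[-1], N2[-1], N2[0], N1[0])
--         kcais += 1
-- ===== SOURCE B (Python) =====
-- def panels(shape, closed=False):
--     # Single flat pass: enumerate panels by one global counter and recover the
--     # (row, column) position with divmod, instead of nested row/column loops.
--     nbn, nbpn = shape[0], shape[1]
--     ppr = nbpn - 1 if closed else nbpn  # panels per row
--     for p in range(max(nbn - 1, 0) * max(ppr, 0)):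
--         kcais, kpan = divmod(p, ppr)
--         base = kcais * nbpn
--         nxt = 0 if kpan + 1 == nbpn else kpan + 1
--         yield (base + kpan, base + nbpn + kpan, base + nbpn + nxt, base + nxt)
-- ===== Notes on version B (the rewrite author's own statement) =====
-- stated objective: alternative
-- what changed: B replaces A's nested row/column loops with a single flat loop over one global panel counter, recovering the (row, panel) position by divmod and computing the four indices arithmetically; the panel count per row absorbs A's separate wrap-around yield.
import Mathlib
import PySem

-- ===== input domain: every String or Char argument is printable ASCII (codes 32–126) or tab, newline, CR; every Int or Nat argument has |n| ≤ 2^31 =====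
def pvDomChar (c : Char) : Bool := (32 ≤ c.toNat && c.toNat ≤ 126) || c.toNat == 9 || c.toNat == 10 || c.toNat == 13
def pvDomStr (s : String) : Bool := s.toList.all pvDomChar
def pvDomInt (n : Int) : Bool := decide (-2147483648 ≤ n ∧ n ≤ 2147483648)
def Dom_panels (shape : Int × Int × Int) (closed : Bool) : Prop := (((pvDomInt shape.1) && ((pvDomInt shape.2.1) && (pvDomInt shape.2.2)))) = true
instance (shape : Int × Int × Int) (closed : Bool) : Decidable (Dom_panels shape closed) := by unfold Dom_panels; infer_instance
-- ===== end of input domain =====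

-- B replaces A's nested row/column loops by ONE flat loop over a global panel counter,
-- recovering (row, panel) by divmod and computing the four indices arithmetically
-- (objective: alternative decomposition). A is a generator; equivalence is about the
-- list of yielded tuples.

-- ===== PORT A =====
-- 'while kcais < nbn-1' stepping by 1 is a fold over range(0, nbn-1); likewise the inner
-- while. List indexing N[i] is PySem.List.pyGetD: up to the IndexError inputs excluded by
-- Pre_panels every index (including -1) is in range, so the default is never consulted.
def panels (shape : Int × Int × Int) (closed : Bool) : List (Int × Int × Int × Int) :=
  let nbn := shape.1
  let nbpn := shape.2.1
  (PySem.List.pyRange 0 (nbn - 1) 1).foldl (fun acc kcais =>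
    let N1 := PySem.List.pyRange (kcais * nbpn) ((kcais + 1) * nbpn) 1
    let N2 := PySem.List.pyRange ((kcais + 1) * nbpn) ((kcais + 2) * nbpn) 1
    let acc2 := (PySem.List.pyRange 0 (nbpn - 1) 1).foldl (fun acc2 kpan =>
      acc2 ++ [(PySem.List.pyGetD N1 kpan 0, PySem.List.pyGetD N2 kpan 0,
                PySem.List.pyGetD N2 (kpan + 1) 0, PySem.List.pyGetD N1 (kpan + 1) 0)]) acc
    if !closed then
      acc2 ++ [(PySem.List.pyGetD N1 (-1) 0, PySem.List.pyGetD N2 (-1) 0,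
                PySem.List.pyGetD N2 0 0, PySem.List.pyGetD N1 0 0)]
    else acc2) []

-- ===== PORT B =====
def panels_alt (shape : Int × Int × Int) (closed : Bool) : List (Int × Int × Int × Int) :=
  let nbn := shape.1
  let nbpn := shape.2.1
  let ppr := if closed then nbpn - 1 else nbpn
  (PySem.List.pyRange 0 (max (nbn - 1) 0 * max ppr 0) 1).map (fun p =>
    let kcais := PySem.Int.floordiv p ppr
    let kpan := PySem.Int.mod p ppr
    let base := kcais * nbpn
    let nxt := if kpan + 1 = nbpn then 0 else kpan + 1
    (base + kpan, base + nbpn + kpan, base + nbpn + nxt, base + nxt))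

-- ===== PRECONDITION & SPEC =====
-- Pre_ excludes exactly the inputs where A raises IndexError: closed=False with at least
-- two nervures but nbpn ≤ 0 makes the per-row index lists empty and N1[-1] raises.
def Pre_panels (shape : Int × Int × Int) (closed : Bool) : Prop :=
  closed = true ∨ shape.1 ≤ 1 ∨ 1 ≤ shape.2.1
instance (shape : Int × Int × Int) (closed : Bool) : Decidable (Pre_panels shape closed) := by unfold Pre_panels; infer_instance
def pvWitness_panels : (Int × Int × Int) × Bool := ((3, 3, 3), false)

def Spec_panels (shape : Int × Int × Int) (closed : Bool) (out : List (Int × Int × Int × Int)) : Prop := out = panels_alt shape closed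
instance (shape : Int × Int × Int) (closed : Bool) (out : List (Int × Int × Int × Int)) : Decidable (Spec_panels shape closed out) := by unfold Spec_panels; infer_instance

-- ===== CLAIM (what is proved, stated in full; the proofs are below) =====
def Claim_equal_panels : Prop := ∀ (shape : Int × Int × Int) (closed : Bool), Dom_panels shape closed → Pre_panels shape closed → Spec_panels shape closed (panels shape closed)

-- ===== LEMMAS AND PROOFS =====

-- an in-range nonnegative index into range(a, b) reads a + k
lemma getD_pyRange (a b k : Int) (h0 : 0 ≤ k) (h1 : k < b - a) :
    PySem.List.pyGetD (PySem.List.pyRange a b 1) k 0 = a + k := by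
  rw [PySem.List.pyGetD_eq_getElem _ _ h0 (by rw [PySem.List.length_pyRange_one]; omega)]
  rw [PySem.List.getElem_pyRange_one]
  omega

-- index -1 into a nonempty range(a, b) reads the last element b - 1
lemma getD_pyRange_neg_one (a b : Int) (h : a < b) :
    PySem.List.pyGetD (PySem.List.pyRange a b 1) (-1) 0 = b - 1 := by
  simp only [PySem.List.pyGetD, PySem.List.pyGet?, PySem.List.pyIdx?, Int.reduceNeg,
    Int.neg_nonneg, Int.reduceLE, reduceIte, PySem.List.length_pyRange_one, Int.ofNat_toNat,
    neg_le_neg_iff, le_sup_iff, or_false, neg_neg, Int.toNat_one,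
    PySem.List.getElem?_pyRange_one, Int.lt_toNat]
  rw [if_pos (by omega), Option.bind]
  rw [if_pos (by omega)]
  simp only [Option.getD_some]
  omega

-- one caisson's panels, as B computes them once divmod has recovered the row
def pvRow (nbpn : Int) (kcais : Int) (kpan : Int) : Int × Int × Int × Int :=
  (kcais * nbpn + kpan,
   kcais * nbpn + nbpn + kpan,
   kcais * nbpn + nbpn + (if kpan + 1 = nbpn then 0 else kpan + 1),
   kcais * nbpn + (if kpan + 1 = nbpn then 0 else kpan + 1))

-- a range of m*k mapped splits into m blocks of k (divmod decomposition of the counter)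
lemma map_pyRange_mul {α : Type} (f : Int → α) (m k : Int) (hk : 0 < k) (hm : 0 ≤ m) :
    (PySem.List.pyRange 0 (m * k) 1).map f =
    (PySem.List.pyRange 0 m 1).flatMap (fun i =>
      (PySem.List.pyRange 0 k 1).map (fun j => f (i * k + j))) := by
  obtain ⟨n, rfl⟩ := Int.eq_ofNat_of_zero_le hm
  induction n with
  | zero => simp [PySem.List.pyRange_zero]
  | succ n ih =>
    have hn : (0:Int) ≤ (n:Int) := Int.natCast_nonneg n
    have hb1 : (0:Int) ≤ (n:Int) * k := mul_nonneg hn (le_of_lt hk)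
    push_cast
    rw [show ((n:Int) + 1) * k = (n:Int) * k + k from by ring]
    rw [PySem.List.pyRange_one_append 0 ((n:Int) * k) ((n:Int) * k + k) hb1 (by omega)]
    rw [PySem.List.pyRange_one_succ_right hn]
    rw [List.map_append, List.flatMap_append]
    have ihh := ih
    push_cast at ihh
    rw [ihh hn]
    congr 1
    simp only [List.flatMap_cons, List.flatMap_nil, List.append_nil]
    simp only [PySem.List.pyRange_one, List.map_map]
    rw [show ((n:Int) * k + k - (n:Int) * k).toNat = (k - 0).toNat from by omega]
    apply List.map_congr_left
    intro t _
    simp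

-- A's row (index lists + separate wrap yield) equals B's row, for every kcais,
-- whenever the row is well-formed (ppr := panels per row is positive)
lemma row_eq (nbpn kcais : Int) (closed : Bool)
    (h : 0 < (if closed then nbpn - 1 else nbpn)) :
    (let N1 := PySem.List.pyRange (kcais * nbpn) ((kcais + 1) * nbpn) 1
     let N2 := PySem.List.pyRange ((kcais + 1) * nbpn) ((kcais + 2) * nbpn) 1
     let row := (PySem.List.pyRange 0 (nbpn - 1) 1).map (fun kpan =>
        (PySem.List.pyGetD N1 kpan 0, PySem.List.pyGetD N2 kpan 0,
         PySem.List.pyGetD N2 (kpan + 1) 0, PySem.List.pyGetD N1 (kpan + 1) 0))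
     if !closed then
       row ++ [(PySem.List.pyGetD N1 (-1) 0, PySem.List.pyGetD N2 (-1) 0,
                PySem.List.pyGetD N2 0 0, PySem.List.pyGetD N1 0 0)]
     else row) =
    (PySem.List.pyRange 0 (if closed then nbpn - 1 else nbpn) 1).map (pvRow nbpn kcais) := by
  have hmap : ∀ (c : Int), c + 1 ≤ nbpn →
      ((PySem.List.pyRange 0 c 1).map (fun kpan =>
        (PySem.List.pyGetD (PySem.List.pyRange (kcais * nbpn) ((kcais + 1) * nbpn) 1) kpan 0,
         PySem.List.pyGetD (PySem.List.pyRange ((kcais + 1) * nbpn) ((kcais + 2) * nbpn) 1) kpan 0,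
         PySem.List.pyGetD (PySem.List.pyRange ((kcais + 1) * nbpn) ((kcais + 2) * nbpn) 1) (kpan + 1) 0,
         PySem.List.pyGetD (PySem.List.pyRange (kcais * nbpn) ((kcais + 1) * nbpn) 1) (kpan + 1) 0))) =
      ((PySem.List.pyRange 0 c 1).map (pvRow nbpn kcais)) := by
    intro c hc
    apply List.map_congr_left
    intro kpan hmem
    rw [PySem.List.mem_pyRange_one] at hmem
    have h1 : (kcais + 1) * nbpn - kcais * nbpn = nbpn := by ring
    have h2 : (kcais + 2) * nbpn - (kcais + 1) * nbpn = nbpn := by ring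
    rw [getD_pyRange _ _ _ (by omega) (by omega), getD_pyRange _ _ _ (by omega) (by omega),
        getD_pyRange _ _ _ (by omega) (by omega), getD_pyRange _ _ _ (by omega) (by omega)]
    unfold pvRow
    rw [if_neg (by omega)]
    simp only [Prod.mk.injEq]
    refine ⟨?_, ?_, ?_, ?_⟩ <;> first | rfl | ring | trivial
  cases closed with
  | true =>
    simp only [Bool.not_true, Bool.false_eq_true, if_false, if_true] at h ⊢
    exact hmap (nbpn - 1) (by omega)
  | false =>
    have hn : 1 ≤ nbpn := by simpa using h
    obtain ⟨m, rfl⟩ : ∃ m : ℤ, nbpn = m + 1 := ⟨nbpn - 1, by ring⟩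
    have hm : 0 ≤ m := by omega
    simp only [Bool.not_false, reduceIte, Bool.false_eq_true, if_false, add_sub_cancel_right]
    rw [show PySem.List.pyRange 0 (m + 1) 1 = PySem.List.pyRange 0 m 1 ++ [m] from
      PySem.List.pyRange_one_succ_right hm]
    rw [List.map_append]
    rw [hmap m (by omega)]
    congr 1
    simp only [List.map_cons, List.map_nil, List.cons.injEq, and_true]
    have e1 : (kcais + 1) * (m + 1) - 1 = kcais * (m + 1) + m := by ring
    have e2 : (kcais + 2) * (m + 1) - 1 = kcais * (m + 1) + (m + 1) + m := by ring
    rw [getD_pyRange_neg_one _ _ (by nlinarith), getD_pyRange_neg_one _ _ (by nlinarith),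
        getD_pyRange _ _ _ (by omega) (by nlinarith), getD_pyRange _ _ _ (by omega) (by nlinarith)]
    unfold pvRow
    rw [if_pos (by ring)]
    simp only [Prod.mk.injEq]
    refine ⟨?_, ?_, ?_, ?_⟩ <;> first | rfl | ring | trivial

-- A equals the flatMap-of-rows normal form whenever every row is well-formed
lemma panels_eq_rows (nbn nbpn z : Int) (closed : Bool)
    (h : 0 < (if closed then nbpn - 1 else nbpn)) :
    panels (nbn, nbpn, z) closed =
    (PySem.List.pyRange 0 (nbn - 1) 1).flatMap (fun kcais =>
      (PySem.List.pyRange 0 (if closed then nbpn - 1 else nbpn) 1).map (pvRow nbpn kcais)) := by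
  unfold panels
  simp only
  rw [show (fun (acc : List (Int × Int × Int × Int)) (kcais : Int) =>
      let N1 := PySem.List.pyRange (kcais * nbpn) ((kcais + 1) * nbpn) 1
      let N2 := PySem.List.pyRange ((kcais + 1) * nbpn) ((kcais + 2) * nbpn) 1
      let acc2 := (PySem.List.pyRange 0 (nbpn - 1) 1).foldl (fun acc2 kpan =>
        acc2 ++ [(PySem.List.pyGetD N1 kpan 0, PySem.List.pyGetD N2 kpan 0,
                  PySem.List.pyGetD N2 (kpan + 1) 0, PySem.List.pyGetD N1 (kpan + 1) 0)]) acc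
      if !closed then
        acc2 ++ [(PySem.List.pyGetD N1 (-1) 0, PySem.List.pyGetD N2 (-1) 0,
                  PySem.List.pyGetD N2 0 0, PySem.List.pyGetD N1 0 0)]
      else acc2) = (fun acc kcais => acc ++
        (PySem.List.pyRange 0 (if closed then nbpn - 1 else nbpn) 1).map (pvRow nbpn kcais)) from ?_]
  · exact PySem.List.foldl_append_eq_flatMap _ _ []
  · funext acc kcais
    have hrow := row_eq nbpn kcais closed h
    cases closed with
    | true =>
      simp only [Bool.not_true, Bool.false_eq_true, if_false, if_true] at hrow ⊢
      rw [PySem.List.foldl_append_singleton_eq_map, hrow]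
    | false =>
      simp only [Bool.not_false, reduceIte] at hrow ⊢
      rw [PySem.List.foldl_append_singleton_eq_map, List.append_assoc, hrow]

-- a fold whose step returns the accumulator unchanged is constant
lemma foldl_const {α β : Type} (l : List β) (acc : α) :
    List.foldl (fun a (_ : β) => a) acc l = acc := by
  induction l generalizing acc with
  | nil => rfl
  | cons x xs ih => simp [List.foldl, ih]

-- ===== VERDICT (by name: the statement is the Claim_ definition above) =====
theorem panels_spec : Claim_equal_panels := by
  intro shape closed _ hpre
  unfold Spec_panels
  obtain ⟨nbn, nbpn, z⟩ := shape
  have hpre' : closed = true ∨ nbn ≤ 1 ∨ 1 ≤ nbpn := hpre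
  by_cases hrow : 0 < (if closed then nbpn - 1 else nbpn)
  · by_cases hnbn : nbn ≤ 1
    · -- no caissons at all: both sides empty
      unfold panels panels_alt
      simp only
      rw [show max (nbn - 1) 0 = 0 from by omega, zero_mul,
          show PySem.List.pyRange 0 (nbn - 1) 1 = [] from PySem.List.pyRange_one_eq_nil (by omega),
          show PySem.List.pyRange 0 0 1 = [] from PySem.List.pyRange_one_eq_nil (by omega)]
      simp
    · rw [panels_eq_rows nbn nbpn z closed hrow]
      unfold panels_alt
      simp only
      rw [show max (nbn - 1) 0 = nbn - 1 from by omega,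
          show max (if closed then nbpn - 1 else nbpn) 0 = (if closed then nbpn - 1 else nbpn)
            from by omega]
      rw [map_pyRange_mul _ (nbn - 1) _ hrow (by omega)]
      congr 1
      funext i
      apply List.map_congr_left
      intro j hj
      rw [PySem.List.mem_pyRange_one] at hj
      have hd : PySem.Int.floordiv (i * (if closed then nbpn - 1 else nbpn) + j)
          (if closed then nbpn - 1 else nbpn) = i := by
        rw [PySem.Int.floordiv_eq_iff_of_pos hrow]
        constructor
        · linarith
        · rw [show (i + 1) * (if closed then nbpn - 1 else nbpn)
              = i * (if closed then nbpn - 1 else nbpn) + (if closed then nbpn - 1 else nbpn)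
              from by ring]
          linarith
      have hmod : PySem.Int.mod (i * (if closed then nbpn - 1 else nbpn) + j)
          (if closed then nbpn - 1 else nbpn) = j := by
        have h := PySem.Int.floordiv_mul_add_mod
          (i * (if closed then nbpn - 1 else nbpn) + j) (if closed then nbpn - 1 else nbpn)
        rw [hd] at h
        linarith
      simp only [hd, hmod, pvRow]
  · -- no panels per row: both sides empty
    unfold panels panels_alt
    simp only
    rw [show max (if closed then nbpn - 1 else nbpn) 0 = 0 from by omega, mul_zero,
        show PySem.List.pyRange 0 0 1 = [] from PySem.List.pyRange_one_eq_nil (by omega)]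
    simp only [List.map_nil]
    cases closed with
    | true =>
      simp only [if_true] at hrow
      rw [show PySem.List.pyRange 0 (nbpn - 1) 1 = []
            from PySem.List.pyRange_one_eq_nil (by omega)]
      simp only [List.foldl_nil, Bool.not_true, Bool.false_eq_true, if_false]
      exact foldl_const _ _
    | false =>
      simp only [Bool.false_eq_true, if_false] at hrow
      have hnbn : nbn ≤ 1 := by
        rcases hpre' with h | h | h
        · exact absurd h Bool.false_ne_true
        · exact h
        · omega
      rw [show PySem.List.pyRange 0 (nbn - 1) 1 = []
            from PySem.List.pyRange_one_eq_nil (by omega)]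
      rfl
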